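-- pv_equiv track=rewrite | github.com/alberttrann/multi-agent_deep-research | multi-agent/utils.py | format_sources_section
-- ===== SOURCE A (Python) =====
-- from typing import Dict, Any, Optional, List, Tuple
--
-- def format_sources_section(sources: List[Dict[str, str]]) -> str:
--     """Format the sources section of the response with proper markdown"""
--     sources_section = "\n\n## Sources Cited\n\n"
--
--     if not sources:
--         return sources_section + "No sources were found during the research phase."
--
--     research_papers = [s for s in sources if s['type'] == 'research_paper']
--     articles = [s for s in sources if s['type'] == 'article']
--
--     if research_papers:
--         sources_section += "\n### Research Papers\n"
--         for idx, source in enumerate(research_papers, 1):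
--             sources_section += f"{idx}. [{source['title']}]({source['url']}) - {source['date']}\n"
--
--     if articles:
--         sources_section += "\n### Technical Articles & Resources\n"
--         for idx, source in enumerate(articles, 1):
--             sources_section += f"{idx}. [{source['title']}]({source['url']}) - {source['date']}\n"
--
--     # Add line break after sources section
--     sources_section += "\n"
--     return sources_section
-- ===== SOURCE B (Python) =====
-- def format_sources_section(sources):
--     """Format the sources section of the response with proper markdown"""
--     out = "\n\n## Sources Cited\n\n"
--     if not sources:
--         return out + "No sources were found during the research phase."
--     order = {'research_paper': 0, 'article': 1}
--     headings = {'research_paper': '### Research Papers',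
--                 'article': '### Technical Articles & Resources'}
--     kept = [s for s in sources if s['type'] in order]
--     kept = sorted(kept, key=lambda s: order[s['type']])
--     prev = None
--     idx = 0
--     for s in kept:
--         t = s['type']
--         if t != prev:
--             out += "\n" + headings[t] + "\n"
--             prev = t
--             idx = 0
--         idx += 1
--         out += f"{idx}. [{s['title']}]({s['url']}) - {s['date']}\n"
--     return out + "\n"
-- ===== Notes on version B (the rewrite author's own statement) =====
-- stated objective: alternative
-- what changed: A filters the sources once per type and renders each group with its own enumerate loop; B instead stably sorts the typed sources by a type-priority key and renders everything in ONE scan over the sorted list, emitting a section heading whenever the type changes and numbering with a counter that resets at each change.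
import Mathlib
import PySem

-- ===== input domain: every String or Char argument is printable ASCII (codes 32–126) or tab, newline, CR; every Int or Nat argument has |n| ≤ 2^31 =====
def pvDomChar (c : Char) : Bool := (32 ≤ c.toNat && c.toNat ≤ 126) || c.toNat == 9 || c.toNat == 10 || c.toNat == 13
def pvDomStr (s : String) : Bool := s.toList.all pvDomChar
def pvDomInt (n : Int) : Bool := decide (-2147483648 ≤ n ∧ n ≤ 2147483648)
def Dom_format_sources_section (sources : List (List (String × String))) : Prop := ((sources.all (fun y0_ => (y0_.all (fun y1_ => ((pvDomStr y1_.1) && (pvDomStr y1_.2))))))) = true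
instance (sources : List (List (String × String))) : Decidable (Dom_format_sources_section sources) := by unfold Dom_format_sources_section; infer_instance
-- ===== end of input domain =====

-- B replaces A's per-type filter passes and two rendering loops by a different algorithm:
-- stably sort the typed sources by a type-priority key, then ONE scan over the sorted list
-- that emits a heading whenever the type changes and numbers entries with a resetting counter
-- (objective: alternative).

-- ===== PORT A =====
-- both Pythons render an entry line with the same f-string; shared helper (missing keys excluded by Pre_)
def pvLine (p : Int × List (String × String)) : String :=
  PySem.Int.toStr p.1 ++ ". [" ++ ((List.lookup "title" p.2).getD "") ++ "](" ++
    ((List.lookup "url" p.2).getD "") ++ ") - " ++ ((List.lookup "date" p.2).getD "") ++ "\n"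

def format_sources_section (sources : List (List (String × String))) : String :=
  let ss0 := "\n\n## Sources Cited\n\n"
  if sources.isEmpty then ss0 ++ "No sources were found during the research phase."
  else
    let rp := sources.filter (fun s => List.lookup "type" s == some "research_paper")
    let ar := sources.filter (fun s => List.lookup "type" s == some "article")
    let ss1 := if rp.isEmpty then ss0 else
      (PySem.List.enumerate rp 1).foldl (fun acc p => acc ++ pvLine p) (ss0 ++ "\n### Research Papers\n")
    let ss2 := if ar.isEmpty then ss1 else
      (PySem.List.enumerate ar 1).foldl (fun acc p => acc ++ pvLine p) (ss1 ++ "\n### Technical Articles & Resources\n")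
    ss2 ++ "\n"

-- ===== PORT B =====
-- B's dicts 'order' and 'headings' (looked up by type key)
def pvOrder : List (String × Int) := [("research_paper", 0), ("article", 1)]
def pvHeadings : List (String × String) :=
  [("research_paper", "### Research Papers"), ("article", "### Technical Articles & Resources")]

-- the sort key order[s['type']] ('type' present on kept elements; missing keys excluded by Pre_)
def pvPrio (s : List (String × String)) : Int :=
  (pvOrder.lookup ((List.lookup "type" s).getD "")).getD 0

-- one step of B's scan loop: state = (out, prev, idx)
def pvScanStep (st : String × Option String × Int) (s : List (String × String)) :
    String × Option String × Int :=
  let t := (List.lookup "type" s).getD ""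
  let st' := if st.2.1 ≠ some t then
      (st.1 ++ "\n" ++ ((pvHeadings.lookup t).getD "") ++ "\n", some t, (0 : Int))
    else st
  (st'.1 ++ pvLine (st'.2.2 + 1, s), st'.2.1, st'.2.2 + 1)

def format_sources_section_alt (sources : List (List (String × String))) : String :=
  let out := "\n\n## Sources Cited\n\n"
  if sources.isEmpty then out ++ "No sources were found during the research phase."
  else
    let kept := sources.filter (fun s => (pvOrder.lookup ((List.lookup "type" s).getD "")).isSome)
    let kept := PySem.List.sorted kept pvPrio
    let fin := kept.foldl pvScanStep (out, none, 0)
    fin.1 ++ "\n"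

-- ===== PRECONDITION & SPEC =====
-- Pre_ excludes inputs on which the Python A raises KeyError: a source dict without a 'type' key,
-- or a research_paper/article source missing 'title'/'url'/'date'.
def Pre_format_sources_section (sources : List (List (String × String))) : Prop :=
  ∀ s ∈ sources, (List.lookup "type" s).isSome = true ∧
    ((List.lookup "type" s = some "research_paper" ∨ List.lookup "type" s = some "article") →
      (List.lookup "title" s).isSome = true ∧ (List.lookup "url" s).isSome = true ∧
        (List.lookup "date" s).isSome = true)
instance (sources : List (List (String × String))) : Decidable (Pre_format_sources_section sources) := by
  unfold Pre_format_sources_section; infer_instance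

def pvWitness_format_sources_section : (List (List (String × String))) :=
  [[("type", "research_paper"), ("title", "T"), ("url", "U"), ("date", "D")],
   [("type", "article"), ("title", "A"), ("url", "V"), ("date", "E")]]

def Spec_format_sources_section (sources : List (List (String × String))) (out : String) : Prop := out = format_sources_section_alt sources
instance (sources : List (List (String × String))) (out : String) : Decidable (Spec_format_sources_section sources out) := by unfold Spec_format_sources_section; infer_instance

-- ===== CLAIM (what is proved, stated in full; the proofs are below) =====
def Claim_equal_format_sources_section : Prop := ∀ (sources : List (List (String × String))), Dom_format_sources_section sources → Pre_format_sources_section sources → Spec_format_sources_section sources (format_sources_section sources)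

-- ===== LEMMAS AND PROOFS =====
-- A's two filter predicates, named
def pvRP (s : List (String × String)) : Bool := List.lookup "type" s == some "research_paper"
def pvAR (s : List (String × String)) : Bool := List.lookup "type" s == some "article"

-- concatenation of rendered lines, used to describe both loops
def pvCat (l : List String) : String := l.foldr (· ++ ·) ""

lemma pvCat_nil : pvCat [] = "" := rfl
lemma pvCat_cons (a : String) (l : List String) : pvCat (a :: l) = a ++ pvCat l := rfl

lemma pv_foldl_line (l : List (Int × List (String × String))) (s0 : String) :
    l.foldl (fun acc p => acc ++ pvLine p) s0 = s0 ++ pvCat (l.map pvLine) := by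
  induction l generalizing s0 with
  | nil => simp [pvCat_nil]
  | cons x xs ih => simp [List.foldl_cons, ih, pvCat_cons, String.append_assoc]

-- B's kept-predicate is exactly "research_paper or article"
lemma pv_kept_iff (s : List (String × String)) :
    ((pvOrder.lookup ((List.lookup "type" s).getD "")).isSome) = (pvRP s || pvAR s) := by
  unfold pvRP pvAR
  rcases h : List.lookup "type" s with _ | t
  · simp [pvOrder, List.lookup]
  · by_cases h1 : t = "research_paper"
    · subst h1; simp [pvOrder]
    · by_cases h2 : t = "article"
      · subst h2; simp [pvOrder]
      · simp only [Option.getD_some, pvOrder, List.lookup]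
        rw [show (t == "research_paper") = false from beq_eq_false_iff_ne.mpr h1,
            show (t == "article") = false from beq_eq_false_iff_ne.mpr h2]
        simp [h1, h2]

lemma pv_prio_rp {s : List (String × String)} (h : pvRP s = true) : pvPrio s = 0 := by
  unfold pvRP at h
  rw [beq_iff_eq] at h
  simp [pvPrio, h, pvOrder]

lemma pv_prio_ar {s : List (String × String)} (h : pvAR s = true) : pvPrio s = 1 := by
  unfold pvAR at h
  rw [beq_iff_eq] at h
  simp [pvPrio, h, pvOrder, List.lookup]

lemma pv_rp_not_ar {s : List (String × String)} (h : pvRP s = true) : pvAR s = false := by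
  unfold pvRP at h; unfold pvAR
  rw [beq_iff_eq] at h
  simp [h]

-- inserting a priority-0 element into (zeros ++ ones) lands between them
lemma pv_ins0 (r a : List (List (String × String))) (x : List (String × String))
    (hr : ∀ y ∈ r, pvPrio y = 0) (ha : ∀ y ∈ a, pvPrio y = 1) (hx : pvPrio x = 0) :
    PySem.List.insertBy (fun p q => decide (pvPrio p < pvPrio q)) x (r ++ a) = r ++ x :: a := by
  induction r with
  | nil =>
    cases a with
    | nil => simp [PySem.List.insertBy]
    | cons y a' =>
      have := ha y (by simp)
      simp [PySem.List.insertBy, hx, this]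
  | cons y r' ih =>
    have h0 := hr y (by simp)
    simp only [List.cons_append, PySem.List.insertBy, hx, h0]
    have : ¬ ((0:Int) < 0) := by omega
    simp [ih (fun z hz => hr z (by simp [hz]))]

-- inserting a priority-1 element appends at the end
lemma pv_ins1 (r a : List (List (String × String))) (x : List (String × String))
    (hr : ∀ y ∈ r, pvPrio y = 0) (ha : ∀ y ∈ a, pvPrio y = 1) (hx : pvPrio x = 1) :
    PySem.List.insertBy (fun p q => decide (pvPrio p < pvPrio q)) x (r ++ a) = (r ++ a) ++ [x] := by
  apply PySem.List.insertBy_of_forall_not_before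
  intro y hy
  rcases List.mem_append.mp hy with h | h
  · have := hr y h; simp [hx, this]
  · have := ha y h; simp [hx, this]

-- the insertion-sort fold partitions a {rp,ar} list stably into the two blocks
lemma pv_fold_ins (l r a : List (List (String × String)))
    (hr : ∀ y ∈ r, pvPrio y = 0) (ha : ∀ y ∈ a, pvPrio y = 1)
    (hl : ∀ x ∈ l, pvRP x || pvAR x) :
    l.foldl (fun acc x => PySem.List.insertBy (fun p q => decide (pvPrio p < pvPrio q)) x acc) (r ++ a)
      = (r ++ l.filter pvRP) ++ (a ++ l.filter pvAR) := by
  induction l generalizing r a with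
  | nil => simp
  | cons x xs ih =>
    by_cases hx : pvRP x = true
    · have h0 := pv_prio_rp hx
      have hna := pv_rp_not_ar hx
      rw [List.foldl_cons, pv_ins0 r a x hr ha h0]
      have : r ++ x :: a = (r ++ [x]) ++ a := by simp
      rw [this, ih (r ++ [x]) a
        (by intro y hy; rcases List.mem_append.mp hy with h | h
            · exact hr y h
            · simp at h; subst h; exact h0)
        ha (fun z hz => hl z (by simp [hz]))]
      simp [hx, hna]
    · have hxa : pvAR x = true := by
        have := hl x (by simp)
        simpa [hx] using this
      have h1 := pv_prio_ar hxa
      rw [List.foldl_cons, pv_ins1 r a x hr ha h1]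
      have : (r ++ a) ++ [x] = r ++ (a ++ [x]) := by simp
      rw [this, ih r (a ++ [x]) hr
        (by intro y hy; rcases List.mem_append.mp hy with h | h
            · exact ha y h
            · simp at h; subst h; exact h1)
        (fun z hz => hl z (by simp [hz]))]
      simp [hx, hxa]

-- B's stable sort of the kept sources is exactly A's two filters, concatenated
lemma pv_sorted_split (sources : List (List (String × String))) :
    PySem.List.sorted
        (sources.filter (fun s => (pvOrder.lookup ((List.lookup "type" s).getD "")).isSome)) pvPrio
      = sources.filter pvRP ++ sources.filter pvAR := by
  have hk : (sources.filter (fun s => (pvOrder.lookup ((List.lookup "type" s).getD "")).isSome))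
      = sources.filter (fun s => pvRP s || pvAR s) := by
    apply List.filter_congr
    intro x _
    exact pv_kept_iff x
  rw [PySem.List.sorted_eq_foldl_insertBy, hk]
  have := pv_fold_ins (sources.filter (fun s => pvRP s || pvAR s)) [] []
    (by intro y hy; simp at hy) (by intro y hy; simp at hy)
    (by intro x hx; exact (List.mem_filter.mp hx).2)
  simp only [List.nil_append] at this
  rw [this]
  congr 1
  · rw [List.filter_filter]
    apply List.filter_congr
    intro x _
    cases h : pvRP x <;> simp_all
  · rw [List.filter_filter]
    apply List.filter_congr
    intro x _
    cases h : pvAR x <;> simp_all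

-- scanning a homogeneous block whose type matches prev: lines only, counter keeps running
lemma pv_scan_cont (l : List (List (String × String))) (t : String) (out : String) (i : Int)
    (h : ∀ s ∈ l, List.lookup "type" s = some t) :
    l.foldl pvScanStep (out, some t, i)
      = (out ++ pvCat ((PySem.List.enumerate l (i + 1)).map pvLine), some t, i + l.length) := by
  induction l generalizing out i with
  | nil => simp [pvCat_nil]
  | cons x xs ih =>
    have hx := h x (by simp)
    rw [List.foldl_cons]
    have hstep : pvScanStep (out, some t, i) x = (out ++ pvLine (i + 1, x), some t, i + 1) := by
      simp [pvScanStep, hx]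
    rw [hstep, ih (out ++ pvLine (i + 1, x)) (i + 1) (fun s hs => h s (by simp [hs]))]
    rw [PySem.List.enumerate_cons]
    refine congrArg₂ _ ?_ (congrArg _ ?_)
    · simp [pvCat_cons, String.append_assoc]
    · simp; omega

-- scanning a nonempty homogeneous block whose type differs from prev: heading, then lines from 1
lemma pv_scan_block (l : List (List (String × String))) (t : String) (out : String)
    (prev : Option String) (i : Int) (hne : prev ≠ some t) (hl : l ≠ [])
    (h : ∀ s ∈ l, List.lookup "type" s = some t) :
    l.foldl pvScanStep (out, prev, i)
      = (out ++ "\n" ++ ((pvHeadings.lookup t).getD "") ++ "\n"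
          ++ pvCat ((PySem.List.enumerate l 1).map pvLine), some t, (l.length : Int)) := by
  cases l with
  | nil => exact absurd rfl hl
  | cons x xs =>
    have hx := h x (by simp)
    rw [List.foldl_cons]
    have hstep2 : pvScanStep (out, prev, i) x
        = ((out ++ "\n" ++ ((pvHeadings.lookup t).getD "") ++ "\n") ++ pvLine (0 + 1, x), some t, (0 : Int) + 1) := by
      simp [pvScanStep, hx, hne, String.append_assoc]
    rw [hstep2]
    simp only [zero_add]
    rw [pv_scan_cont xs t _ 1 (fun s hs => h s (by simp [hs]))]
    rw [PySem.List.enumerate_cons]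
    refine congrArg₂ _ ?_ (congrArg _ ?_)
    · simp [pvCat_cons, String.append_assoc]
    · simp; omega

-- elements of A's filters carry the expected 'type'
lemma pv_mem_rp {sources : List (List (String × String))} {s : List (String × String)}
    (h : s ∈ sources.filter pvRP) : List.lookup "type" s = some "research_paper" := by
  have := (List.mem_filter.mp h).2
  unfold pvRP at this
  exact beq_iff_eq.mp this

lemma pv_mem_ar {sources : List (List (String × String))} {s : List (String × String)}
    (h : s ∈ sources.filter pvAR) : List.lookup "type" s = some "article" := by
  have := (List.mem_filter.mp h).2
  unfold pvAR at this
  exact beq_iff_eq.mp this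

lemma pv_rp_fold : (fun s => List.lookup "type" s == some "research_paper") = pvRP := rfl
lemma pv_ar_fold : (fun s => List.lookup "type" s == some "article") = pvAR := rfl

lemma pv_head_rp : ((pvHeadings.lookup "research_paper").getD "") = "### Research Papers" := rfl
lemma pv_head_ar : ((pvHeadings.lookup "article").getD "")
    = "### Technical Articles & Resources" := rfl

lemma pv_lit_rp (r : String) : ("\n" : String) ++ ("### Research Papers" ++ ("\n" ++ r))
    = "\n### Research Papers\n" ++ r := by
  rw [← String.append_assoc, ← String.append_assoc]
  exact congrArg (fun z => z ++ r) rfl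

lemma pv_lit_ar (r : String) : ("\n" : String) ++ ("### Technical Articles & Resources" ++ ("\n" ++ r))
    = "\n### Technical Articles & Resources\n" ++ r := by
  rw [← String.append_assoc, ← String.append_assoc]
  exact congrArg (fun z => z ++ r) rfl

-- ===== VERDICT (by name: the statement is the Claim_ definition above) =====
theorem format_sources_section_spec : Claim_equal_format_sources_section := by
  intro sources _ _
  unfold Spec_format_sources_section format_sources_section format_sources_section_alt
  by_cases he : sources.isEmpty
  · simp [he]
  · simp only [he, Bool.false_eq_true, if_false, pv_sorted_split, List.foldl_append,
      pv_rp_fold, pv_ar_fold]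
    by_cases hr : sources.filter pvRP = [] <;> by_cases ha : sources.filter pvAR = []
    · simp [hr, ha]
    · rw [hr]
      simp only [List.foldl_nil]
      rw [pv_scan_block (sources.filter pvAR) "article" _ none 0 (by simp) ha
        (fun s hs => pv_mem_ar hs)]
      simp only [ha, List.isEmpty_iff, List.isEmpty_nil, if_true, if_false,
        pv_foldl_line, pv_head_ar, String.append_assoc, pv_lit_ar]
    · rw [ha]
      simp only [List.foldl_nil]
      rw [pv_scan_block (sources.filter pvRP) "research_paper" _ none 0 (by simp) hr
        (fun s hs => pv_mem_rp hs)]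
      simp only [hr, List.isEmpty_iff, List.isEmpty_nil, if_true, if_false,
        pv_foldl_line, pv_head_rp, String.append_assoc, pv_lit_rp]
    · rw [pv_scan_block (sources.filter pvRP) "research_paper" _ none 0 (by simp) hr
        (fun s hs => pv_mem_rp hs)]
      rw [pv_scan_block (sources.filter pvAR) "article" _ (some "research_paper") _
        (by simp) ha (fun s hs => pv_mem_ar hs)]
      simp only [hr, ha, List.isEmpty_iff, if_false, pv_foldl_line,
        pv_head_rp, pv_head_ar, String.append_assoc, pv_lit_rp, pv_lit_ar]
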